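-- pv_equiv track=rewrite | github.com/dptekippe/bot-sports-empire-backend | depth_render_gym.py | source_tree
-- ===== SOURCE A (Python) =====
-- from collections import defaultdict
-- from typing import Any, Dict, List, Optional, Tuple
--
-- def source_tree(sources: List[Dict]) -> str:
--     """
--     Emit a source/citation tree as a Mermaid mindmap.
--     sources: [{"label": "ESPN ADP", "url": "https://...", "type": "primary|secondary"}]
--     """
--     lines = ["mindmap", "  root((Sources))"]
--     type_nodes: Dict[str, List] = defaultdict(list)
--     for s in sources:
--         stype = s.get("type", "secondary")
--         type_nodes[stype].append(s)
--
--     indent = "  "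
--     for stype, items in type_nodes.items():
--         lines.append(f"{indent}  {stype.upper()}")
--         for item in items:
--             lbl = item.get("label", "Source")
--             url = item.get("url", "")
--             node_txt = f"{lbl}" + (f"\\n{url}" if url else "")
--             lines.append(f"{indent}    {node_txt}")
--
--     diagram = "\n".join(lines)
--     return f"```mermaid\n{diagram}\n```"
-- ===== SOURCE B (Python) =====
-- def source_tree(sources):
--     """
--     Emit a source/citation tree as a Mermaid mindmap.
--     Instead of grouping sources into per-type buckets with a dict, compute the
--     distinct types in first-appearance order, then re-scan the whole source
--     list once per type, emitting matching nodes directly.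
--     """
--     types = list(dict.fromkeys(s.get("type", "secondary") for s in sources))
--     lines = ["mindmap", "  root((Sources))"]
--     for stype in types:
--         lines.append(f"    {stype.upper()}")
--         for s in sources:
--             if s.get("type", "secondary") == stype:
--                 lbl = s.get("label", "Source")
--                 url = s.get("url", "")
--                 lines.append(f"      {lbl}" + (f"\\n{url}" if url else ""))
--     return "```mermaid\n" + "\n".join(lines) + "\n```"
-- ===== Notes on version B (the rewrite author's own statement) =====
-- stated objective: alternative
-- what changed: Replaces the defaultdict bucket-grouping pass and iteration over dict items with an ordered-dedup of the type keys followed by a repeated filtering re-scan of the source list for each type, emitting node lines directly with no per-type bucket lists.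
import Mathlib
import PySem

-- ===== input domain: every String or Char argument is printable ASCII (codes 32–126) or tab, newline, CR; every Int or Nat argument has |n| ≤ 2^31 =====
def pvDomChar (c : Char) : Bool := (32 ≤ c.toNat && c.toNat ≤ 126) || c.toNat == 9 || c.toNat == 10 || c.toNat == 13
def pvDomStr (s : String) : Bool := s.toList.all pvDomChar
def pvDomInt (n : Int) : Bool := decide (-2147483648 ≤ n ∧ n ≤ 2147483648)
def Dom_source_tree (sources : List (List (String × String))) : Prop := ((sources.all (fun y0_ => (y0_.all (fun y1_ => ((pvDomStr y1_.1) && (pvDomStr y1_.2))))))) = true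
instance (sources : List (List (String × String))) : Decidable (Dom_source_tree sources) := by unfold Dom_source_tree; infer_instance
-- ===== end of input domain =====

-- B renders the same Mermaid mindmap without the dict-of-buckets: it dedups the
-- type keys in first-appearance order and re-scans the source list per type
-- (objective: alternative decomposition, same output).

-- ===== PORT A =====
def source_tree (sources : List (List (String × String))) : String :=
  let lines : List String := ["mindmap", "  root((Sources))"]
  let type_nodes : PySem.Dict String (List (List (String × String))) :=
    sources.foldl (fun d s =>
      let stype := (PySem.Dict.mk s).getD "type" "secondary"
      d.modify stype [] (fun items => items ++ [s])) PySem.Dict.empty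
  let indent := "  "
  let lines := type_nodes.items.foldl (fun lines ti =>
    let lines := lines ++ [indent ++ "  " ++ PySem.Str.upper ti.1]
    ti.2.foldl (fun lines item =>
      let lbl := (PySem.Dict.mk item).getD "label" "Source"
      let url := (PySem.Dict.mk item).getD "url" ""
      let node_txt := lbl ++ (if url ≠ "" then "\\n" ++ url else "")
      lines ++ [indent ++ "    " ++ node_txt]) lines) lines
  let diagram := PySem.Str.join "\n" lines
  "```mermaid\n" ++ diagram ++ "\n```"

-- ===== PORT B =====
def source_tree_alt (sources : List (List (String × String))) : String :=
  let types : List String :=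
    PySem.List.dedup (sources.map (fun s => (PySem.Dict.mk s).getD "type" "secondary"))
  let lines : List String := types.foldl (fun lines stype =>
    sources.foldl (fun lines s =>
      if (PySem.Dict.mk s).getD "type" "secondary" == stype then
        let lbl := (PySem.Dict.mk s).getD "label" "Source"
        let url := (PySem.Dict.mk s).getD "url" ""
        lines ++ ["      " ++ (lbl ++ (if url ≠ "" then "\\n" ++ url else ""))]
      else lines)
      (lines ++ ["    " ++ PySem.Str.upper stype]))
    ["mindmap", "  root((Sources))"]
  "```mermaid\n" ++ PySem.Str.join "\n" lines ++ "\n```"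

-- ===== PRECONDITION & SPEC =====
def Spec_source_tree (sources : List (List (String × String))) (out : String) : Prop := out = source_tree_alt sources
instance (sources : List (List (String × String))) (out : String) : Decidable (Spec_source_tree sources out) := by unfold Spec_source_tree; infer_instance

-- ===== CLAIM (what is proved, stated in full; the proofs are below) =====
def Claim_equal_source_tree : Prop := ∀ (sources : List (List (String × String))), Dom_source_tree sources → Spec_source_tree sources (source_tree sources)

-- ===== LEMMAS AND PROOFS =====

def pvKey (s : List (String × String)) : String := (PySem.Dict.mk s).getD "type" "secondary"

def pvNode (s : List (String × String)) : String :=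
  let lbl := (PySem.Dict.mk s).getD "label" "Source"
  let url := (PySem.Dict.mk s).getD "url" ""
  lbl ++ (if url ≠ "" then "\\n" ++ url else "")

-- A's grouping dict, as a fold over the (key, source) pairs
theorem dict_eq_foldl_pairs (sources : List (List (String × String))) :
    sources.foldl (fun d s =>
        d.modify (pvKey s) [] (fun items => items ++ [s])) PySem.Dict.empty
      = (sources.map (fun s => (pvKey s, s))).foldl
          (fun d p => d.modify p.1 [] (fun items => items ++ [p.2])) PySem.Dict.empty := by
  rw [List.foldl_map]

theorem dict_keys (sources : List (List (String × String))) :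
    (sources.foldl (fun d s =>
        d.modify (pvKey s) [] (fun items => items ++ [s])) PySem.Dict.empty).keys
      = PySem.List.dedup (sources.map pvKey) := by
  have h := PySem.Dict.keys_foldl_modify_key sources pvKey []
    (fun _ s => fun items => items ++ [s]) PySem.Dict.empty
  simpa [PySem.Set.update_nil_left, PySem.List.dedup_eq_ofList] using h

theorem dict_getD (sources : List (List (String × String))) (t : String) :
    (sources.foldl (fun d s =>
        d.modify (pvKey s) [] (fun items => items ++ [s])) PySem.Dict.empty).getD t []
      = sources.filter (fun s => pvKey s == t) := by
  rw [dict_eq_foldl_pairs]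
  rw [PySem.Dict.getD_foldl_modify_append]
  simp [List.filter_map, Function.comp_def]

theorem dict_items (sources : List (List (String × String))) :
    (sources.foldl (fun d s =>
        d.modify (pvKey s) [] (fun items => items ++ [s])) PySem.Dict.empty).items
      = (PySem.List.dedup (sources.map pvKey)).map
          (fun t => (t, sources.filter (fun s => pvKey s == t))) := by
  rw [PySem.Dict.items_eq_map_keys _ (by rw [dict_keys]; exact PySem.List.nodup_dedup _) []]
  rw [dict_keys]
  exact List.map_congr_left (fun t _ => by rw [dict_getD])

theorem lines_eq (sources : List (List (String × String))) :
    (sources.foldl (fun d s =>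
        d.modify (pvKey s) [] (fun items => items ++ [s])) PySem.Dict.empty).items.foldl
      (fun lines ti =>
        ti.2.foldl (fun lines item => lines ++ ["      " ++ pvNode item])
          (lines ++ ["    " ++ PySem.Str.upper ti.1]))
      ["mindmap", "  root((Sources))"]
    = (PySem.List.dedup (sources.map pvKey)).foldl (fun lines stype =>
        sources.foldl (fun lines s =>
          if pvKey s == stype then lines ++ ["      " ++ pvNode s] else lines)
          (lines ++ ["    " ++ PySem.Str.upper stype]))
        ["mindmap", "  root((Sources))"] := by
  rw [dict_items, List.foldl_map]
  refine PySem.List.foldl_congr_mem _ _ _ _ (fun lines t _ => ?_)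
  rw [PySem.List.foldl_append_singleton_eq_map, PySem.List.foldl_append_if]

-- ===== VERDICT (by name: the statement is the Claim_ definition above) =====
theorem source_tree_spec : Claim_equal_source_tree := by
  intro sources _
  show source_tree sources = source_tree_alt sources
  unfold source_tree source_tree_alt
  simp only []
  have e1 : ("  " : String) ++ "  " = "    " := by decide
  have e2 : ("  " : String) ++ "    " = "      " := by decide
  have h := lines_eq sources
  simp only [pvKey, pvNode] at h
  simp only [e1, e2]
  rw [h]
  rfl
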